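-- pv_equiv track=rewrite | github.com/xxxxdc/SHIP_Tool | ship/util.py | recog_code
-- ===== SOURCE A (Python) =====
-- def recog_code(lines, index):
--     codes, addcodes, delcodes = '', '', ''
--     addline, delline = 0, 0
--     lens = len(lines)
--     while index < lens and \
--                not lines[index].startswith('commit') and \
--                not lines[index].startswith('diff --git') and \
--                not lines[index].startswith('@@ '):
--         line = lines[index].strip()
--         if len(line) >= 1:
--             codes+= line+' '                   # 上下文代码行
--             if line.startswith('+'):
--                 addcodes+= line[2: ]+' '      # 增加代码行
--                 addline += 1
--             elif line.startswith('-'):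
--                 delcodes+= line[2: ]+' '       # 删除代码行
--                 delline += 1
--         index += 1
--     return codes, addcodes, delcodes, addline, delline, index
-- ===== SOURCE B (Python) =====
-- def recog_code(lines, index):
--     # Phase 1: advance only, collecting the raw region up to the boundary marker.
--     lens = len(lines)
--     raw = []
--     i = index
--     while i < lens and not (lines[i].startswith('commit')
--                             or lines[i].startswith('diff --git')
--                             or lines[i].startswith('@@ ')):
--         raw.append(lines[i])
--         i += 1
--     # Phase 2: separate passes over the stripped, non-empty region.
--     region = [l for l in (r.strip() for r in raw) if l]
--     adds = [l[2:] for l in region if l.startswith('+')]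
--     dels = [l[2:] for l in region if l.startswith('-')]
--     codes = ' '.join(region) + ' ' if region else ''
--     addcodes = ' '.join(adds) + ' ' if adds else ''
--     delcodes = ' '.join(dels) + ' ' if dels else ''
--     return codes, addcodes, delcodes, len(adds), len(dels), i
-- ===== Notes on version B (the rewrite author's own statement) =====
-- stated objective: faster
-- what changed: A's single while-loop threading five string/counter accumulators is replaced by a collect-only walk to the boundary marker followed by separate comprehension passes (strip+filter region, '+'/'-' filters) whose results are concatenated once with ' '.join.
import Mathlib
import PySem

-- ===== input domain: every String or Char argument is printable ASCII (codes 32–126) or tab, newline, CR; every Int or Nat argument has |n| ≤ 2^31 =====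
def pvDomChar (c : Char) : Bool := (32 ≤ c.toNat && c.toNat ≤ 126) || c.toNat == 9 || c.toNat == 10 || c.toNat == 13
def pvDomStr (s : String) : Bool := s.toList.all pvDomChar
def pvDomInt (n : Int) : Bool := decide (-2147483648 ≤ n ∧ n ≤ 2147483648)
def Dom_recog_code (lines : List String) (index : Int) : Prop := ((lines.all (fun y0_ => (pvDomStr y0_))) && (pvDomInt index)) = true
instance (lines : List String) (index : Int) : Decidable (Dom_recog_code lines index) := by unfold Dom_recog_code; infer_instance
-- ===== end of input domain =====

-- B re-decomposes A's single accumulating scan (five string += accumulators) into a collect-only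
-- walk to the boundary plus separate filter/join passes; measured faster (join vs repeated +=).

-- ===== PORT A =====
-- the while-loop of A, with its five accumulators; pyGet? none = Python's IndexError (excluded by Pre_)
def recogA_loop (lines : List String) (index : Int) (codes addcodes delcodes : String)
    (addline delline : Int) : String × String × String × Int × Int × Int :=
  if _h : index < (lines.length : Int) then
    match PySem.List.pyGet? lines index with
    | none => (codes, addcodes, delcodes, addline, delline, index)
    | some cur =>
      if PySem.Str.startswith cur "commit" || PySem.Str.startswith cur "diff --git"
          || PySem.Str.startswith cur "@@ " then
        (codes, addcodes, delcodes, addline, delline, index)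
      else
        let line := PySem.Str.strip cur
        if 1 ≤ PySem.Str.len line then
          if PySem.Str.startswith line "+" then
            recogA_loop lines (index + 1) (codes ++ (line ++ " "))
              (addcodes ++ (PySem.Str.slice line (some 2) none ++ " ")) delcodes (addline + 1) delline
          else if PySem.Str.startswith line "-" then
            recogA_loop lines (index + 1) (codes ++ (line ++ " "))
              addcodes (delcodes ++ (PySem.Str.slice line (some 2) none ++ " ")) addline (delline + 1)
          else
            recogA_loop lines (index + 1) (codes ++ (line ++ " ")) addcodes delcodes addline delline
        else
          recogA_loop lines (index + 1) codes addcodes delcodes addline delline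
  else
    (codes, addcodes, delcodes, addline, delline, index)
termination_by ((lines.length : Int) - index).toNat
decreasing_by all_goals omega

def recog_code (lines : List String) (index : Int) : String × String × String × Int × Int × Int :=
  recogA_loop lines index "" "" "" 0 0

-- ===== PORT B =====
-- Phase-1 loop of B: walk to the boundary marker, collecting the raw region and the end index.
def recogB_collect (lines : List String) (i : Int) : List String × Int :=
  if _h : i < (lines.length : Int) then
    match PySem.List.pyGet? lines i with
    | none => ([], i)
    | some cur =>
      if PySem.Str.startswith cur "commit" || PySem.Str.startswith cur "diff --git"
          || PySem.Str.startswith cur "@@ " then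
        ([], i)
      else
        let p := recogB_collect lines (i + 1)
        (cur :: p.1, p.2)
  else
    ([], i)
termination_by ((lines.length : Int) - i).toNat
decreasing_by all_goals omega

-- region = [l for l in (r.strip() for r in raw) if l]
def regionOf (raw : List String) : List String :=
  (raw.map PySem.Str.strip).filter (fun l => l ≠ "")

-- adds = [l[2:] for l in region if l.startswith('+')]  (dels analogously with '-')
def addsOf (region : List String) : List String :=
  (region.filter (fun l => PySem.Str.startswith l "+")).map (fun l => PySem.Str.slice l (some 2) none)

def delsOf (region : List String) : List String :=
  (region.filter (fun l => PySem.Str.startswith l "-")).map (fun l => PySem.Str.slice l (some 2) none)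

-- ' '.join(xs) + ' ' if xs else ''
def joinSp (xs : List String) : String :=
  if xs = [] then "" else PySem.Str.join " " xs ++ " "

def recog_code_alt (lines : List String) (index : Int) : String × String × String × Int × Int × Int :=
  let p := recogB_collect lines index
  let region := regionOf p.1
  let adds := addsOf region
  let dels := delsOf region
  (joinSp region, joinSp adds, joinSp dels, (adds.length : Int), (dels.length : Int), p.2)

-- ===== PRECONDITION & SPEC =====
-- Python A raises IndexError (lines[index] on index < -len(lines)); excluded, nothing else.
def Pre_recog_code (lines : List String) (index : Int) : Prop :=
  -(lines.length : Int) ≤ index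
instance (lines : List String) (index : Int) : Decidable (Pre_recog_code lines index) := by
  unfold Pre_recog_code; infer_instance

def pvWitness_recog_code : List String × Int := (["+ a", "@@ x"], 0)

def Spec_recog_code (lines : List String) (index : Int) (out : String × String × String × Int × Int × Int) : Prop := out = recog_code_alt lines index
instance (lines : List String) (index : Int) (out : String × String × String × Int × Int × Int) : Decidable (Spec_recog_code lines index out) := by unfold Spec_recog_code; infer_instance

-- ===== CLAIM (what is proved, stated in full; the proofs are below) =====
def Claim_equal_recog_code : Prop := ∀ (lines : List String) (index : Int), Dom_recog_code lines index → Pre_recog_code lines index → Spec_recog_code lines index (recog_code lines index)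

-- ===== LEMMAS AND PROOFS =====

theorem joinSp_cons (x : String) (xs : List String) :
    joinSp (x :: xs) = (x ++ " ") ++ joinSp xs := by
  cases xs with
  | nil =>
      apply String.toList_inj.mp
      simp [joinSp, PySem.Str.toList_join, PySem.Chars.join_singleton]
  | cons y ys =>
      apply String.toList_inj.mp
      simp [joinSp, PySem.Str.toList_join, PySem.Chars.join_cons_cons]

theorem regionOf_cons (x : String) (r : List String) :
    regionOf (x :: r) =
      if PySem.Str.strip x ≠ "" then PySem.Str.strip x :: regionOf r else regionOf r := by
  by_cases h : PySem.Str.strip x = "" <;> simp [regionOf, h]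

theorem addsOf_cons (l : String) (r : List String) :
    addsOf (l :: r) =
      if PySem.Str.startswith l "+" then
        PySem.Str.slice l (some 2) none :: addsOf r
      else addsOf r := by
  cases h : PySem.Str.startswith l "+" <;>
    simp only [addsOf, List.filter_cons, h, Bool.false_eq_true, if_false, if_true, List.map_cons]

theorem delsOf_cons (l : String) (r : List String) :
    delsOf (l :: r) =
      if PySem.Str.startswith l "-" then
        PySem.Str.slice l (some 2) none :: delsOf r
      else delsOf r := by
  cases h : PySem.Str.startswith l "-" <;>
    simp only [delsOf, List.filter_cons, h, Bool.false_eq_true, if_false, if_true, List.map_cons]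

theorem len_pos_iff (s : String) : (1 ≤ PySem.Str.len s) ↔ s ≠ "" := by
  rw [PySem.Str.len_eq]
  constructor
  · intro h he
    rw [he] at h
    norm_num at h
  · intro h
    have h1 : s.toList ≠ [] := by
      intro hl
      exact h (String.toList_inj.mp (by rw [hl]; rfl))
    have h2 := List.length_pos_of_ne_nil h1
    omega

theorem plus_not_minus (s : String) (h : PySem.Str.startswith s "+" = true) :
    PySem.Str.startswith s "-" = false := by
  simp only [PySem.Str.startswith_eq] at h ⊢
  rw [PySem.Chars.startswith_iff] at h
  rw [← Bool.not_eq_true, PySem.Chars.startswith_iff]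
  intro hc
  obtain ⟨t1, e1⟩ := h
  obtain ⟨t2, e2⟩ := hc
  rw [← e1] at e2
  simp at e2

theorem loop_eq (lines : List String) :
    ∀ (n : Nat) (i : Int) (c a d : String) (al dl : Int),
      ((lines.length : Int) - i).toNat ≤ n →
      recogA_loop lines i c a d al dl =
        (c ++ joinSp (regionOf (recogB_collect lines i).1),
         a ++ joinSp (addsOf (regionOf (recogB_collect lines i).1)),
         d ++ joinSp (delsOf (regionOf (recogB_collect lines i).1)),
         al + ((addsOf (regionOf (recogB_collect lines i).1)).length : Int),
         dl + ((delsOf (regionOf (recogB_collect lines i).1)).length : Int),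
         (recogB_collect lines i).2) := by
  intro n
  induction n with
  | zero =>
      intro i c a d al dl hn
      have hge : ¬ i < (lines.length : Int) := by omega
      rw [recogA_loop, recogB_collect]
      simp [hge, regionOf, addsOf, delsOf, joinSp]
  | succ m ih =>
      intro i c a d al dl hn
      rw [recogA_loop, recogB_collect]
      by_cases hlt : i < (lines.length : Int)
      case neg => simp [hlt, regionOf, addsOf, delsOf, joinSp]
      case pos =>
      have hrec : ((lines.length : Int) - (i + 1)).toNat ≤ m := by omega
      have IH := fun c a d al dl => ih (i + 1) c a d al dl hrec
      rw [dif_pos hlt, dif_pos hlt]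
      cases hg : PySem.List.pyGet? lines i with
      | none => simp [regionOf, addsOf, delsOf, joinSp]
      | some cur =>
        by_cases hb : (PySem.Str.startswith cur "commit" || PySem.Str.startswith cur "diff --git"
            || PySem.Str.startswith cur "@@ ") = true
        · have hb' := hb
          simp at hb'
          simp [hb', regionOf, addsOf, delsOf, joinSp]
        · have hb' := hb
          simp at hb'
          by_cases hlen : 1 ≤ PySem.Str.len (PySem.Str.strip cur)
          · have hne : PySem.Str.strip cur ≠ "" := (len_pos_iff _).mp hlen
            have hlen' := hlen
            simp at hlen'
            by_cases hp : PySem.Str.startswith (PySem.Str.strip cur) "+" = true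
            · have hm := plus_not_minus _ hp
              have hp' := hp; simp at hp'
              have hm' := hm; simp at hm'
              simp [hb', hlen', hp', hm', IH, regionOf_cons, addsOf_cons, delsOf_cons,
                    joinSp_cons, hne, String.append_assoc]
              omega
            · have hp' := hp; simp at hp'
              by_cases hm : PySem.Str.startswith (PySem.Str.strip cur) "-" = true
              · have hm' := hm; simp at hm'
                simp [hb', hlen', hp', hm', IH, regionOf_cons, addsOf_cons, delsOf_cons,
                      joinSp_cons, hne, String.append_assoc]
                omega
              · have hm' := hm; simp at hm'
                simp [hb', hlen', hp', hm', IH, regionOf_cons, addsOf_cons, delsOf_cons,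
                      joinSp_cons, hne, String.append_assoc]
          · have hne : PySem.Str.strip cur = "" := by
              by_contra hx
              exact hlen ((len_pos_iff _).mpr hx)
            simp [hb', hne, IH, regionOf_cons]

-- ===== VERDICT (by name: the statement is the Claim_ definition above) =====
theorem recog_code_spec : Claim_equal_recog_code := by
  intro lines index _dom _pre
  unfold Spec_recog_code recog_code recog_code_alt
  rw [loop_eq lines ((lines.length : Int) - index).toNat index "" "" "" 0 0 le_rfl]
  simp
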